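-- pv_equiv track=rewrite | github.com/WayneLin552/Doudizhu_fast_card_features_extraction | fun340.py | fenlei
-- ===== SOURCE A (Python) =====
-- def fenlei(a):
--     list_5 = []
--     list_6 = []
--     list_7 = []
--     list_other = []
--     for i in a:
--         if len(i) == 5:
--             list_5.append(i)
--         elif len(i) == 6:
--             list_6.append(i)
--         elif len(i) == 7:
--             list_7.append(i)
--         else:
--             list_other.append(i)
--     return list_5,list_6,list_7,list_other
-- ===== SOURCE B (Python) =====
-- def fenlei(a):
--     a = list(a)
--     return ([i for i in a if len(i) == 5],
--             [i for i in a if len(i) == 6],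
--             [i for i in a if len(i) == 7],
--             [i for i in a if len(i) not in (5, 6, 7)])
-- ===== Notes on version B (the rewrite author's own statement) =====
-- stated objective: simpler
-- what changed: Replaces the single if/elif accumulator loop with four independent filtering passes (list comprehensions), one per bucket.
import Mathlib
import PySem

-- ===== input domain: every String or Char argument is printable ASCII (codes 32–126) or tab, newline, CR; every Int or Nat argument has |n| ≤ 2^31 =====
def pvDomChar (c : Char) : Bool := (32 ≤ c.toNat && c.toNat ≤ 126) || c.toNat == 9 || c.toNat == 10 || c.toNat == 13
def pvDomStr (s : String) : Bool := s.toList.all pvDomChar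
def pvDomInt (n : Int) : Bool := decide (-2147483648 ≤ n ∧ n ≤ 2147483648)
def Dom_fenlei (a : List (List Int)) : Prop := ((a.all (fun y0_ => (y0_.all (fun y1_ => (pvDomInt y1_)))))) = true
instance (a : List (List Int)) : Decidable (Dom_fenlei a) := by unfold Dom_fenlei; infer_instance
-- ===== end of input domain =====

-- B replaces A's single if/elif accumulator loop with four independent filters, one per bucket (simpler decomposition).

-- ===== PORT A =====
-- single pass appending to four accumulators, branching on len(i)
def fenlei (a : List (List Int)) : List (List Int) × List (List Int) × List (List Int) × List (List Int) :=
  let s := a.foldl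
    (fun (st : List (List Int) × List (List Int) × List (List Int) × List (List Int)) i =>
      let (l5, l6, l7, lo) := st
      if i.length = 5 then (l5 ++ [i], l6, l7, lo)
      else if i.length = 6 then (l5, l6 ++ [i], l7, lo)
      else if i.length = 7 then (l5, l6, l7 ++ [i], lo)
      else (l5, l6, l7, lo ++ [i]))
    ([], [], [], [])
  s

-- ===== PORT B =====
def fenlei_alt (a : List (List Int)) : List (List Int) × List (List Int) × List (List Int) × List (List Int) :=
  (a.filter (fun i => i.length = 5),
   a.filter (fun i => i.length = 6),
   a.filter (fun i => i.length = 7),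
   a.filter (fun i => ¬ (i.length = 5 ∨ i.length = 6 ∨ i.length = 7)))

-- ===== PRECONDITION & SPEC =====
def Spec_fenlei (a : List (List Int)) (out : List (List Int) × List (List Int) × List (List Int) × List (List Int)) : Prop := out = fenlei_alt a
instance (a : List (List Int)) (out : List (List Int) × List (List Int) × List (List Int) × List (List Int)) : Decidable (Spec_fenlei a out) := by unfold Spec_fenlei; infer_instance

-- ===== CLAIM (what is proved, stated in full; the proofs are below) =====
def Claim_equal_fenlei : Prop := ∀ (a : List (List Int)), Dom_fenlei a → Spec_fenlei a (fenlei a)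

-- ===== LEMMAS AND PROOFS =====

-- invariant: the fold from an arbitrary start prepends the start to each filtered bucket
theorem fenlei_fold_inv (a : List (List Int)) (l5 l6 l7 lo : List (List Int)) :
    a.foldl
      (fun (st : List (List Int) × List (List Int) × List (List Int) × List (List Int)) i =>
        let (l5, l6, l7, lo) := st
        if i.length = 5 then (l5 ++ [i], l6, l7, lo)
        else if i.length = 6 then (l5, l6 ++ [i], l7, lo)
        else if i.length = 7 then (l5, l6, l7 ++ [i], lo)
        else (l5, l6, l7, lo ++ [i]))
      (l5, l6, l7, lo)
    = (l5 ++ a.filter (fun i => i.length = 5),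
       l6 ++ a.filter (fun i => i.length = 6),
       l7 ++ a.filter (fun i => i.length = 7),
       lo ++ a.filter (fun i => ¬ (i.length = 5 ∨ i.length = 6 ∨ i.length = 7))) := by
  induction a generalizing l5 l6 l7 lo with
  | nil => simp
  | cons x xs ih =>
    simp only [List.foldl_cons, List.filter_cons]
    by_cases h5 : x.length = 5
    · simp [h5, ih]
    · by_cases h6 : x.length = 6
      · simp [h6, ih]
      · by_cases h7 : x.length = 7
        · simp [h5, h7, ih]
        · simp [h5, h6, h7, ih]

-- ===== VERDICT (by name: the statement is the Claim_ definition above) =====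
theorem fenlei_spec : Claim_equal_fenlei := by
  intro a _
  show fenlei a = fenlei_alt a
  simp [fenlei, fenlei_alt, fenlei_fold_inv]
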